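-- pv_equiv track=rewrite | github.com/kevinkorfmann/watchgen | tests/test_timepieces_tsinfer.py | simplify_tree_sequence
-- ===== SOURCE A (Python) =====
-- def simplify_tree_sequence(nodes, edges, sample_ids):
--     """Simplified illustration of the simplify algorithm."""
--     ancestral = set(sample_ids)
--     edge_map = {}
--     for left, right, parent, child in edges:
--         if child not in edge_map:
--             edge_map[child] = []
--         edge_map[child].append((left, right, parent))
--
--     queue = list(sample_ids)
--     while queue:
--         node = queue.pop(0)
--         if node in edge_map:
--             for left, right, parent in edge_map[node]:
--                 if parent not in ancestral:
--                     ancestral.add(parent)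
--                     queue.append(parent)
--
--     kept_edges = [(l, r, p, c) for l, r, p, c in edges
--                   if p in ancestral and c in ancestral]
--     kept_nodes = ancestral
--
--     return kept_nodes, kept_edges
-- ===== SOURCE B (Python) =====
-- def simplify_tree_sequence(nodes, edges, sample_ids):
--     """Index-free BFS: no child->parents map, no pop(0); scan the edge list per node."""
--     ancestral = set(sample_ids)
--     frontier = list(sample_ids)
--     i = 0
--     while i < len(frontier):
--         node = frontier[i]
--         i += 1
--         for left, right, parent, child in edges:
--             if child == node and parent not in ancestral:
--                 ancestral.add(parent)
--                 frontier.append(parent)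
--     kept_edges = [(l, r, p, c) for l, r, p, c in edges
--                   if p in ancestral and c in ancestral]
--     return ancestral, kept_edges
-- ===== Notes on version B (the rewrite author's own statement) =====
-- stated objective: simpler
-- what changed: B drops the child->parents dict (edge_map) and the O(n) queue.pop(0) entirely: it advances an index over a growing frontier list and rescans the plain edge list for each popped node, discovering the same ancestors in the same order.
import Mathlib
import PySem

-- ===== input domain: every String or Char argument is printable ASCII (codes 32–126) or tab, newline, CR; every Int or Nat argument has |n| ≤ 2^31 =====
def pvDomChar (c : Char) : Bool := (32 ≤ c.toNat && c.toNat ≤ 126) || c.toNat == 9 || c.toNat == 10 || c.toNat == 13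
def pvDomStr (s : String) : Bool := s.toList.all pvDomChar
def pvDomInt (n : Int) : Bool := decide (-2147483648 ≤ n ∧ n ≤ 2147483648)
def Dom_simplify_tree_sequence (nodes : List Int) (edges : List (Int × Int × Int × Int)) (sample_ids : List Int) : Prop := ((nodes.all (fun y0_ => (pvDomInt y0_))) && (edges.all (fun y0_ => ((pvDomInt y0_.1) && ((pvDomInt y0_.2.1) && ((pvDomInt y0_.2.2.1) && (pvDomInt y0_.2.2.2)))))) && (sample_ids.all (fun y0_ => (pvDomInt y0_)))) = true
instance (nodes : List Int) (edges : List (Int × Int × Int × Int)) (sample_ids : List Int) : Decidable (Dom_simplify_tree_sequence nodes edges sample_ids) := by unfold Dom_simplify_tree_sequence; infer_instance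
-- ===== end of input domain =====

-- B drops A's child->parents dict and the pop(0) queue: it advances over a growing frontier
-- and rescans the plain edge list per node; same reachable set, same discovery order (objective: simpler).

-- ===== PORT A =====

-- number of candidate ints not yet in the ancestral set: termination measure for the BFS loops
def pvMissing (cands : List Int) (anc : PySem.Set Int) : Nat :=
  (cands.filter (fun p => !decide (p ∈ anc))).length

theorem pvMissing_add (cands : List Int) (anc : PySem.Set Int) (p : Int)
    (h1 : p ∈ cands) (h2 : PySem.Set.contains anc p = false) :
    pvMissing cands (PySem.Set.add anc p) + 1 ≤ pvMissing cands anc := by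
  have hnm : p ∉ anc := by simpa using h2
  have hadd : PySem.Set.add anc p = anc ++ [p] := PySem.Set.add_of_not_mem hnm
  unfold pvMissing
  rw [hadd]
  have hfe : (cands.filter (fun x => !decide (x ∈ anc ++ [p]))) =
      (cands.filter (fun x => !decide (x ∈ anc))).filter (fun x => !decide (x = p)) := by
    rw [List.filter_filter]
    apply List.filter_congr
    intro x _
    by_cases hx1 : x ∈ anc <;> by_cases hx2 : x = p <;> simp [hx1, hx2]
  rw [hfe]
  have hpmem : p ∈ cands.filter (fun x => !decide (x ∈ anc)) := by
    rw [List.mem_filter]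
    exact ⟨h1, by simp [hnm]⟩
  have : ((cands.filter (fun x => !decide (x ∈ anc))).filter (fun x => !decide (x = p))).length <
      (cands.filter (fun x => !decide (x ∈ anc))).length := by
    apply List.length_filter_lt_length_iff_exists.mpr
    exact ⟨p, hpmem, by simp⟩
  omega

theorem pvFold_measure {α : Type} (cands : List Int)
    (f : (PySem.Set Int × List Int) → α → (PySem.Set Int × List Int)) :
    ∀ (ps : List α),
    (∀ s a, a ∈ ps → f s a = s ∨ ∃ p, p ∈ cands ∧ PySem.Set.contains s.1 p = false ∧
        f s a = (PySem.Set.add s.1 p, s.2 ++ [p])) →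
    ∀ s : PySem.Set Int × List Int,
      pvMissing cands (ps.foldl f s).1 + (ps.foldl f s).2.length ≤ pvMissing cands s.1 + s.2.length := by
  intro ps
  induction ps with
  | nil => intro _ s; simp
  | cons a ps ih =>
    intro hf s
    have ih' := ih (fun s b hb => hf s b (List.mem_cons_of_mem a hb)) (f s a)
    rw [List.foldl_cons]
    rcases hf s a (List.mem_cons_self) with heq | ⟨p, hp1, hp2, heq⟩
    · rw [heq] at ih' ⊢; exact ih'
    · have hstep := pvMissing_add cands s.1 p hp1 hp2
      rw [heq] at ih' ⊢
      simp only [List.length_append, List.length_cons, List.length_nil] at ih'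
      omega

def pvStepA (s : PySem.Set Int × List Int) (t : Int × Int × Int) : PySem.Set Int × List Int :=
  if PySem.Set.contains s.1 t.2.2 then s else (PySem.Set.add s.1 t.2.2, s.2 ++ [t.2.2])

def pvCandsA (em : PySem.Dict Int (List (Int × Int × Int))) : List Int :=
  (em.values.flatten).map (fun t => t.2.2)

-- A's while loop: pop(0) from queue, iterate edge_map[node], add unseen parents and enqueue them
def pvBfsA (em : PySem.Dict Int (List (Int × Int × Int))) (anc : PySem.Set Int) (queue : List Int) :
    PySem.Set Int :=
  match queue with
  | [] => anc
  | node :: rest =>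
    if h : em.contains node = true then
      let s := (em.getD node []).foldl pvStepA (anc, [])
      pvBfsA em s.1 (rest ++ s.2)
    else
      pvBfsA em anc rest
termination_by pvMissing (pvCandsA em) anc + queue.length
decreasing_by
  · have hmem : ∀ (s : PySem.Set Int × List Int) (a : Int × Int × Int), a ∈ em.getD node [] →
        pvStepA s a = s ∨ ∃ p, p ∈ pvCandsA em ∧ PySem.Set.contains s.1 p = false ∧
          pvStepA s a = (PySem.Set.add s.1 p, s.2 ++ [p]) := by
      intro s a ha
      unfold pvStepA
      by_cases hc : PySem.Set.contains s.1 a.2.2 = true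
      · left; rw [if_pos hc]
      · right
        refine ⟨a.2.2, ?_, by simpa using hc, by rw [if_neg hc]⟩
        -- a ∈ em.getD node [] with node present ⇒ a ∈ some value list of em
        have hsome : ∃ v, em.get? node = some v := by
          rw [PySem.Dict.contains_eq_isSome_get?] at h
          exact Option.isSome_iff_exists.mp h
        rcases hsome with ⟨v, hv⟩
        have hgd : em.getD node [] = v := PySem.Dict.getD_of_get?_eq_some _ _ hv
        have hvmem : v ∈ em.values := by
          have := PySem.Dict.mem_items_of_get?_eq_some _ hv
          exact List.mem_map_of_mem this
        unfold pvCandsA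
        apply List.mem_map_of_mem
        rw [List.mem_flatten]
        exact ⟨v, hvmem, by rw [hgd] at ha; exact ha⟩
    have hm := pvFold_measure (pvCandsA em) pvStepA (em.getD node []) hmem (anc, [])
    simp only [List.length_nil] at hm
    simp only [List.length_append, List.length_cons]
    omega
  · simp only [List.length_cons]; omega

def simplify_tree_sequence (nodes : List Int) (edges : List (Int × Int × Int × Int)) (sample_ids : List Int) : List Int × (List (Int × Int × Int × Int)) :=
  let ancestral : PySem.Set Int := PySem.Set.ofList sample_ids
  let edge_map : PySem.Dict Int (List (Int × Int × Int)) :=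
    edges.foldl (fun d e =>
      (if d.contains e.2.2.2 then d else d.insert e.2.2.2 []).modify e.2.2.2 []
        (fun v => v ++ [(e.1, e.2.1, e.2.2.1)])) PySem.Dict.empty
  let kept_nodes := pvBfsA edge_map ancestral sample_ids
  let kept_edges := edges.filter (fun e =>
    PySem.Set.contains kept_nodes e.2.2.1 && PySem.Set.contains kept_nodes e.2.2.2)
  (kept_nodes, kept_edges)

-- ===== PORT B =====

def pvStepB (node : Int) (s : PySem.Set Int × List Int) (e : Int × Int × Int × Int) :
    PySem.Set Int × List Int :=
  if e.2.2.2 == node && !(PySem.Set.contains s.1 e.2.2.1) then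
    (PySem.Set.add s.1 e.2.2.1, s.2 ++ [e.2.2.1])
  else s

-- B's while loop: advance over the frontier (suffix view), rescan the full edge list per node
def pvBfsB (edges : List (Int × Int × Int × Int)) (anc : PySem.Set Int) (frontier : List Int) :
    PySem.Set Int :=
  match frontier with
  | [] => anc
  | node :: rest =>
    let s := edges.foldl (pvStepB node) (anc, [])
    pvBfsB edges s.1 (rest ++ s.2)
termination_by pvMissing (edges.map (fun e => e.2.2.1)) anc + frontier.length
decreasing_by
  have hmem : ∀ (s : PySem.Set Int × List Int) (e : Int × Int × Int × Int), e ∈ edges →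
      pvStepB node s e = s ∨ ∃ p, p ∈ edges.map (fun e => e.2.2.1) ∧
        PySem.Set.contains s.1 p = false ∧
        pvStepB node s e = (PySem.Set.add s.1 p, s.2 ++ [p]) := by
    intro s e he
    unfold pvStepB
    by_cases hg : (e.2.2.2 == node && !(PySem.Set.contains s.1 e.2.2.1)) = true
    · right
      have hc : PySem.Set.contains s.1 e.2.2.1 = false := by
        rcases Bool.and_eq_true .. |>.mp hg with ⟨_, h2⟩
        simpa using h2
      exact ⟨e.2.2.1, List.mem_map_of_mem he, hc, by rw [if_pos hg]⟩
    · left; rw [if_neg hg]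
  have hm := pvFold_measure (edges.map (fun e => e.2.2.1)) (pvStepB node) edges hmem (anc, [])
  simp only [List.length_nil] at hm
  simp only [List.foldl_attach, List.length_append, List.length_cons]
  omega

def simplify_tree_sequence_alt (nodes : List Int) (edges : List (Int × Int × Int × Int)) (sample_ids : List Int) : List Int × (List (Int × Int × Int × Int)) :=
  let ancestral : PySem.Set Int := PySem.Set.ofList sample_ids
  let kept_nodes := pvBfsB edges ancestral sample_ids
  let kept_edges := edges.filter (fun e =>
    PySem.Set.contains kept_nodes e.2.2.1 && PySem.Set.contains kept_nodes e.2.2.2)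
  (kept_nodes, kept_edges)

-- ===== PRECONDITION & SPEC =====
def Spec_simplify_tree_sequence (nodes : List Int) (edges : List (Int × Int × Int × Int)) (sample_ids : List Int) (out : List Int × (List (Int × Int × Int × Int))) : Prop := out = simplify_tree_sequence_alt nodes edges sample_ids
instance (nodes : List Int) (edges : List (Int × Int × Int × Int)) (sample_ids : List Int) (out : List Int × (List (Int × Int × Int × Int))) : Decidable (Spec_simplify_tree_sequence nodes edges sample_ids out) := by unfold Spec_simplify_tree_sequence; infer_instance

-- ===== CLAIM (what is proved, stated in full; the proofs are below) =====
def Claim_equal_simplify_tree_sequence : Prop := ∀ (nodes : List Int) (edges : List (Int × Int × Int × Int)) (sample_ids : List Int), Dom_simplify_tree_sequence nodes edges sample_ids → Spec_simplify_tree_sequence nodes edges sample_ids (simplify_tree_sequence nodes edges sample_ids)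

-- ===== LEMMAS AND PROOFS =====

-- A's edge_map build: edge_map[child] collects (l, r, p) triples in edge order
theorem pv_em_getD (edges : List (Int × Int × Int × Int))
    (d : PySem.Dict Int (List (Int × Int × Int))) (node : Int) :
    (edges.foldl (fun d e =>
        (if d.contains e.2.2.2 then d else d.insert e.2.2.2 []).modify e.2.2.2 []
          (fun v => v ++ [(e.1, e.2.1, e.2.2.1)])) d).getD node [] =
      d.getD node [] ++
        (edges.filter (fun e => e.2.2.2 == node)).map (fun e => (e.1, e.2.1, e.2.2.1)) := by
  induction edges generalizing d with
  | nil => simp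
  | cons e es ih =>
    rw [List.foldl_cons, ih]
    have hstep : ((if d.contains e.2.2.2 then d else d.insert e.2.2.2 []).modify e.2.2.2 []
        (fun v => v ++ [(e.1, e.2.1, e.2.2.1)])).getD node [] =
        d.getD node [] ++ (if e.2.2.2 == node then [(e.1, e.2.1, e.2.2.1)] else []) := by
      rw [PySem.Dict.getD_modify]
      by_cases hn : node = e.2.2.2
      · have hget : (if d.contains e.2.2.2 then d else d.insert e.2.2.2 []).getD e.2.2.2 [] =
            d.getD e.2.2.2 [] := by
          by_cases hc : d.contains e.2.2.2 = true
          · rw [if_pos hc]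
          · rw [if_neg hc, PySem.Dict.getD_insert_self]
            exact (PySem.Dict.getD_of_not_contains d [] (by simpa using hc)).symm
        rw [if_pos hn, hget]
        simp [hn]
      · have hget : (if d.contains e.2.2.2 then d else d.insert e.2.2.2 []).getD node [] =
            d.getD node [] := by
          by_cases hc : d.contains e.2.2.2 = true
          · rw [if_pos hc]
          · rw [if_neg hc, PySem.Dict.getD_insert_of_ne _ _ _ hn]
        rw [if_neg hn, hget]
        have hbe : (e.2.2.2 == node) = false := by
          simp only [beq_eq_false_iff_ne]
          exact fun h => hn h.symm
        simp [hbe]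
    rw [hstep]
    by_cases hg : (e.2.2.2 == node) = true <;> simp [hg]
  
-- B's inner edge scan = A's iteration over edge_map[node]
theorem pv_fold_eq (node : Int) (edges : List (Int × Int × Int × Int)) :
    ∀ s, edges.foldl (pvStepB node) s =
      ((edges.filter (fun e => e.2.2.2 == node)).map (fun e => (e.1, e.2.1, e.2.2.1))).foldl pvStepA s := by
  induction edges with
  | nil => intro s; simp
  | cons e es ih =>
    intro s
    rw [List.foldl_cons]
    by_cases hg : (e.2.2.2 == node) = true
    · simp only [List.filter_cons, hg, if_true, List.map_cons, List.foldl_cons]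
      rw [← ih]
      congr 1
      unfold pvStepB pvStepA
      by_cases hc : PySem.Set.contains s.1 e.2.2.1 = true <;> simp [hg, hc]
    · have hgf : (e.2.2.2 == node) = false := by simpa using hg
      simp only [List.filter_cons, hgf, Bool.false_eq_true, if_false]
      rw [← ih]
      congr 1
      unfold pvStepB
      simp [hgf]

-- the two BFS loops agree (same ancestral set, same insertion order)
theorem pv_bfs_eq (edges : List (Int × Int × Int × Int)) (anc : PySem.Set Int) (queue : List Int) :
    pvBfsA (edges.foldl (fun d e =>
        (if d.contains e.2.2.2 then d else d.insert e.2.2.2 []).modify e.2.2.2 []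
          (fun v => v ++ [(e.1, e.2.1, e.2.2.1)])) PySem.Dict.empty) anc queue =
      pvBfsB edges anc queue := by
  fun_induction pvBfsB edges anc queue with
  | case1 anc => rw [pvBfsA]
  | case2 anc node rest s ih =>
    set em := edges.foldl (fun d e =>
        (if d.contains e.2.2.2 then d else d.insert e.2.2.2 []).modify e.2.2.2 []
          (fun v => v ++ [(e.1, e.2.1, e.2.2.1)])) PySem.Dict.empty with hem
    have hgd : em.getD node [] =
        (edges.filter (fun e => e.2.2.2 == node)).map (fun e => (e.1, e.2.1, e.2.2.1)) := by
      rw [hem, pv_em_getD]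
      simp
    have hs0 : s = edges.foldl (pvStepB node) (anc, []) := by
      show List.foldl _ (anc, []) edges.attach = _
      simp [List.foldl_attach]
    have hs : s = (em.getD node []).foldl pvStepA (anc, []) := by
      rw [hs0, hgd, ← pv_fold_eq]
    rw [pvBfsA]
    by_cases h : em.contains node = true
    · simp only [h, dite_true]
      rw [← hs, ← hs0]
      exact ih
    · -- node absent from edge_map: its getD is [] so the filtered list is empty; B's scan is a no-op
      have hnil : em.getD node [] = [] :=
        PySem.Dict.getD_of_not_contains em [] (by simpa using h)
      have hs' : s = (anc, []) := by rw [hs, hnil]; simp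
      have hfalse : em.contains node = false := by simpa using h
      simp only [hfalse, Bool.false_eq_true, dite_false]
      rw [← hs0, hs']
      have ih' := ih
      rw [hs'] at ih'
      simpa using ih'

-- ===== VERDICT (by name: the statement is the Claim_ definition above) =====
theorem simplify_tree_sequence_spec : Claim_equal_simplify_tree_sequence := by
  intro nodes edges sample_ids _
  unfold Spec_simplify_tree_sequence simplify_tree_sequence simplify_tree_sequence_alt
  dsimp only
  rw [pv_bfs_eq]
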